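-- pv_equiv track=rewrite | github.com/MarAvFe/ia-pc1 | codigo/funciones4.py | contarDiferentes
-- ===== SOURCE A (Python) =====
-- def contarDiferentes(lista):
--     # Cuenta los valores diferentes de una lista y su
--     #  cantidad de ocurrencias
--     retorno = [[],[]]
--     for e in lista:
--         if e in retorno[0]:
--             k = retorno[0].index(e)
--             retorno[1][k] += 1
--         else:
--             retorno[0].append(e)
--             retorno[1].append(1)
--     return retorno
-- ===== SOURCE B (Python) =====
-- def contarDiferentes(lista):
--     # Two staged passes: first deduplicate (first-appearance order),
--     # then count each distinct value over the original list.
--     distintos = []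
--     for e in lista:
--         if e not in distintos:
--             distintos.append(e)
--     return [distintos, [lista.count(v) for v in distintos]]
-- ===== Notes on version B (the rewrite author's own statement) =====
-- stated objective: simpler
-- what changed: Replaces A's single interleaved scan that maintains parallel value/count lists (with a list.index lookup and in-place increment per repeated element) by two separate staged passes: a dedup pass building the distinct values in first-appearance order, then counting each distinct value over the original list with list.count.
import Mathlib
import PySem

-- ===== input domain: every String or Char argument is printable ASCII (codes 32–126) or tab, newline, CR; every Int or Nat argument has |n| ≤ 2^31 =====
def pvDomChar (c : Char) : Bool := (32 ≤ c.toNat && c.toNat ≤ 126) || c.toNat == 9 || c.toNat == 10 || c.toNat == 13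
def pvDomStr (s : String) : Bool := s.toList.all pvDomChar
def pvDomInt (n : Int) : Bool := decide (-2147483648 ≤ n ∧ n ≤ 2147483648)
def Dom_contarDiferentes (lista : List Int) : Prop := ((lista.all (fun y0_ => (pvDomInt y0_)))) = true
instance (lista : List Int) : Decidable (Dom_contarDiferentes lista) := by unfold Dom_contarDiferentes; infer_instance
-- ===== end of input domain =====

-- B replaces A's single interleaved scan (parallel value/count lists, list.index + in-place
-- increment per repeat) by two staged passes: dedup first, then count each distinct value;
-- objective: simpler decomposition, same cost.

-- ===== PORT A =====
-- one iteration of A's loop on the state (retorno[0], retorno[1])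
def pvStepA (s : List Int × List Int) (e : Int) : List Int × List Int :=
  if s.1.contains e then
    match PySem.List.index? s.1 e with
    | some k => (s.1, s.2.set k ((s.2.getD k 0) + 1))   -- retorno[1][k] += 1 (k is always in range)
    | none => s                                          -- unreachable: e ∈ retorno[0]
  else (s.1 ++ [e], s.2 ++ [1])

def contarDiferentes (lista : List Int) : List (List Int) :=
  let r := lista.foldl pvStepA ([], [])
  [r.1, r.2]

-- ===== PORT B =====
-- pass 1: distinct values in first-appearance order
def pvDistintos (lista : List Int) : List Int :=
  lista.foldl (fun acc e => if acc.contains e then acc else acc ++ [e]) []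

-- pass 2: [lista.count(v) for v in distintos]
def contarDiferentes_alt (lista : List Int) : List (List Int) :=
  let distintos := pvDistintos lista
  [distintos, distintos.map (fun v => ((PySem.List.count lista v : Nat) : Int))]

-- ===== PRECONDITION & SPEC =====
def Spec_contarDiferentes (lista : List Int) (out : List (List Int)) : Prop := out = contarDiferentes_alt lista
instance (lista : List Int) (out : List (List Int)) : Decidable (Spec_contarDiferentes lista out) := by unfold Spec_contarDiferentes; infer_instance

-- ===== CLAIM (what is proved, stated in full; the proofs are below) =====
def Claim_equal_contarDiferentes : Prop := ∀ (lista : List Int), Dom_contarDiferentes lista → Spec_contarDiferentes lista (contarDiferentes lista)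

-- ===== LEMMAS AND PROOFS =====

-- abbreviations used by the invariant: pvD p = distinct values of prefix p, pvF p = count over p
def pvDed (acc : List Int) (e : Int) : List Int := if acc.contains e then acc else acc ++ [e]
def pvD (p : List Int) : List Int := p.foldl pvDed []
def pvF (p : List Int) : Int → Int := fun v => ((PySem.List.count p v : Nat) : Int)

theorem pvDed_foldl (l : List Int) : ∀ acc (v : Int),
    (v ∈ l.foldl pvDed acc ↔ v ∈ acc ∨ v ∈ l) := by
  induction l with
  | nil => simp
  | cons a l ih =>
    intro acc v
    simp only [List.foldl_cons, ih, pvDed]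
    split <;> rename_i h
    · have ha : a ∈ acc := by simpa using h
      constructor
      · rintro (hv | hv)
        · exact Or.inl hv
        · exact Or.inr (List.mem_cons_of_mem a hv)
      · rintro (hv | hv)
        · exact Or.inl hv
        · rcases List.mem_cons.mp hv with rfl | hv
          · exact Or.inl ha
          · exact Or.inr hv
    · simp only [List.mem_append, List.mem_cons]
      tauto

theorem pvDed_nodup (l : List Int) : ∀ acc, acc.Nodup → (l.foldl pvDed acc).Nodup := by
  induction l with
  | nil => exact fun _ h => h
  | cons a l ih =>
    intro acc h
    simp only [List.foldl_cons, pvDed]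
    split <;> rename_i hc
    · exact ih _ h
    · have ha : a ∉ acc := by simpa using hc
      refine ih _ ?_
      rw [List.nodup_append]
      refine ⟨h, List.nodup_singleton a, ?_⟩
      intro x hx b hb hxb
      simp only [List.mem_singleton] at hb
      exact ha ((hxb.trans hb) ▸ hx)

theorem pvMem_pvD (p : List Int) (v : Int) : v ∈ pvD p ↔ v ∈ p := by
  simpa [pvD] using pvDed_foldl p [] v

theorem pvNodup_pvD (p : List Int) : (pvD p).Nodup := pvDed_nodup p [] (by simp)

theorem pvD_snoc (p : List Int) (e : Int) :
    pvD (p ++ [e]) = if (pvD p).contains e then pvD p else pvD p ++ [e] := by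
  simp [pvD, List.foldl_append, pvDed]

theorem pvF_snoc (p : List Int) (e v : Int) :
    pvF (p ++ [e]) v = pvF p v + (if v = e then 1 else 0) := by
  simp only [pvF, PySem.List.count_eq, List.count_append]
  by_cases h : v = e
  · subst h
    simp
  · rw [List.count_singleton]
    simp [if_neg (fun hh : e = v => h hh.symm), if_neg h]

theorem pvGetD_map_middle (f : Int → Int) (e : Int) (suf : List Int) : ∀ pre : List Int,
    (((pre ++ e :: suf).map f).getD pre.length 0) = f e := by
  intro pre
  induction pre with
  | nil => simp
  | cons a pre ih => simp

theorem pvSet_map_middle (f g : Int → Int) (e : Int) : ∀ (pre suf : List Int),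
    (∀ v ∈ pre, g v = f v) → (∀ v ∈ suf, g v = f v) →
    ((pre ++ e :: suf).map f).set pre.length (g e) = (pre ++ e :: suf).map g := by
  intro pre
  induction pre with
  | nil =>
    intro suf _ hs
    simp only [List.nil_append, List.map_cons, List.length_nil, List.set_cons_zero]
    exact congrArg (g e :: ·) (List.map_congr_left fun v hv => (hs v hv).symm)
  | cons a pre ih =>
    intro suf hp hs
    simp only [List.cons_append, List.map_cons, List.length_cons, List.set_cons_succ]
    rw [hp a (by simp), ih suf (fun v hv => hp v (by simp [hv])) hs]

-- one step of A preserves "state = (distinct values of prefix, their counts over the prefix)"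
theorem pvStepA_inv (p : List Int) (e : Int) :
    pvStepA (pvD p, (pvD p).map (pvF p)) e
      = (pvD (p ++ [e]), (pvD (p ++ [e])).map (pvF (p ++ [e]))) := by
  by_cases hm : e ∈ pvD p
  · -- e already seen: increment its count in place
    have hc : (pvD p).contains e = true := by simpa using hm
    obtain ⟨k, hk⟩ : ∃ k, PySem.List.index? (pvD p) e = some k :=
      Option.isSome_iff_exists.mp ((PySem.List.index?_isSome_iff (pvD p) e).mpr hm)
    obtain ⟨pre, suf, hsplit, hlen, hpre⟩ := (PySem.List.index?_eq_some_iff _ _ _).mp hk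
    have hsuf : e ∉ suf := by
      have hnd := pvNodup_pvD p
      rw [hsplit] at hnd
      exact (List.nodup_cons.mp (List.nodup_append.mp hnd).2.1).1
    rw [pvD_snoc, if_pos hc]
    simp only [pvStepA, hc, hk, if_true]
    refine congrArg (Prod.mk (pvD p)) ?_
    rw [hsplit, ← hlen, pvGetD_map_middle]
    have hge : pvF (p ++ [e]) e = pvF p e + 1 := by simp [pvF_snoc]
    rw [← hge]
    refine pvSet_map_middle (pvF p) (pvF (p ++ [e])) e pre suf ?_ ?_ <;> intro v hv
    · have hne : v ≠ e := fun h => hpre (h ▸ hv)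
      simp [pvF_snoc, hne]
    · have hne : v ≠ e := fun h => hsuf (h ▸ hv)
      simp [pvF_snoc, hne]
  · -- new value: append it with count 1
    have hc : (pvD p).contains e = false := by simpa using hm
    have hep : e ∉ p := fun h => hm ((pvMem_pvD p e).mpr h)
    rw [pvD_snoc, hc]
    simp only [pvStepA, hc, Bool.false_eq_true, if_false, List.map_append, List.map_cons,
      List.map_nil]
    refine congrArg₂ Prod.mk rfl (congrArg₂ (· ++ ·) ?_ ?_)
    · exact (List.map_congr_left (fun v hv => by
        have hv' : v ≠ e := fun h => hep (h ▸ (pvMem_pvD p v).mp hv)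
        simp [pvF_snoc, hv'])).symm
    · have h0 : pvF p e = 0 := by
        simp [pvF, PySem.List.count_eq, List.count_eq_zero.mpr hep]
      simp [pvF_snoc, h0]

theorem pvMain (l : List Int) : ∀ p,
    l.foldl pvStepA (pvD p, (pvD p).map (pvF p))
      = (pvD (p ++ l), (pvD (p ++ l)).map (pvF (p ++ l))) := by
  induction l with
  | nil => simp
  | cons e l ih =>
    intro p
    rw [List.foldl_cons, pvStepA_inv p e, ih (p ++ [e]), List.append_assoc]
    rfl

theorem pvD_eq_distintos (p : List Int) : pvD p = pvDistintos p := rfl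

-- ===== VERDICT (by name: the statement is the Claim_ definition above) =====
theorem contarDiferentes_spec : Claim_equal_contarDiferentes := by
  intro lista _
  show contarDiferentes lista = contarDiferentes_alt lista
  have h := pvMain lista []
  have h0 : (pvD [], (pvD []).map (pvF [])) = (([], []) : List Int × List Int) := rfl
  rw [h0, List.nil_append] at h
  simp only [contarDiferentes, contarDiferentes_alt, h, pvD_eq_distintos]
  rfl
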